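-- pv_equiv track=rewrite | github.com/makora-ai/kernels | Tenstorrent/fusion_store/binary/outer/outer.py | _volume_and_axis
-- ===== SOURCE A (Python) =====
-- def _volume_and_axis(shape) -> tuple[int, int]:
--     dims = [int(x) for x in list(shape)]
--     # Expect 4D like reference, but tolerate other by padding to 4D
--     if len(dims) < 4:
--         dims = [1] * (4 - len(dims)) + dims
--     if len(dims) != 4:
--         raise RuntimeError(f"outer: expected <=4D shape, got {dims}")
--
--     vol = 1
--     axis = None
--     for i, d in enumerate(dims):
--         vol *= d
--         if d != 1:
--             if axis is None:
--                 axis = i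
--             else:
--                 axis = -1  # multiple non-1 dims
--     if axis is None:
--         axis = 2  # scalar; arbitrary
--     return vol, axis
-- ===== SOURCE B (Python) =====
-- def _volume_and_axis(shape) -> tuple[int, int]:
--     dims = [int(x) for x in list(shape)]
--     # Expect 4D like reference, but tolerate other by padding to 4D
--     if len(dims) < 4:
--         dims = [1] * (4 - len(dims)) + dims
--     if len(dims) != 4:
--         raise RuntimeError(f"outer: expected <=4D shape, got {dims}")
--
--     d0, d1, d2, d3 = dims
--     mask = (d0 != 1) | (d1 != 1) << 1 | (d2 != 1) << 2 | (d3 != 1) << 3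
--     axis = {0: 2, 1: 0, 2: 1, 4: 2, 8: 3}.get(mask, -1)
--     return d0 * d1 * d2 * d3, axis
-- ===== Notes on version B (the rewrite author's own statement) =====
-- stated objective: alternative
-- what changed: replaces A's enumerate loop with its vol accumulator and None/first/-1 axis sentinel state machine by a loop-free version: unpack the 4 padded dims, form a 4-bit mask of non-unit positions, and read the axis off a one-hot mask table (default -1)
import Mathlib
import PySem

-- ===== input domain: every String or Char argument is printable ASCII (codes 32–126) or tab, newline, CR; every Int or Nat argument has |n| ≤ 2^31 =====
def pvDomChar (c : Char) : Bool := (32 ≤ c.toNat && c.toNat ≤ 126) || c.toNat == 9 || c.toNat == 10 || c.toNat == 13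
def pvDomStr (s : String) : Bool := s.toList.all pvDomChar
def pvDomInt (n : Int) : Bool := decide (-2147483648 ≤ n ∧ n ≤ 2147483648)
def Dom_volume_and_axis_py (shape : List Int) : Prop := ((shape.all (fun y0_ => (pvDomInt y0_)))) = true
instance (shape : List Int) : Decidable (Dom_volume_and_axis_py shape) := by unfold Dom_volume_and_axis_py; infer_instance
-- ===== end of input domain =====

-- B replaces A's enumerate loop with vol accumulator and None/first/-1 axis sentinel state machine
-- by a loop-free bitmask of non-unit positions and a one-hot mask table lookup (objective: alternative).


-- ===== PORT A =====
-- shared prologue of both Pythons: int(x) on an int is the identity, then left-pad with 1s to 4 dims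
def pvPad (shape : List Int) : List Int :=
  if shape.length < 4 then List.replicate (4 - shape.length) 1 ++ shape else shape

-- A's loop: `for i, d in enumerate(dims): vol *= d; if d != 1: axis = i if axis is None else -1`
def pvLoopA : List Int → Int → Int → Option Int → Int × Option Int
  | [], _, vol, axis => (vol, axis)
  | d :: rest, i, vol, axis =>
      pvLoopA rest (i + 1) (vol * d)
        (if d ≠ 1 then (match axis with | none => some i | some _ => some (-1)) else axis)

def volume_and_axis_py (shape : List Int) : Int × Int :=
  let dims := pvPad shape
  let r := pvLoopA dims 0 1 none
  (r.1, r.2.getD 2)   -- `if axis is None: axis = 2`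

-- ===== PORT B =====
-- `{0: 2, 1: 0, 2: 1, 4: 2, 8: 3}` of Source B
def pvAxisTable : PySem.Dict Int Int := PySem.Dict.ofList [(0, 2), (1, 0), (2, 1), (4, 2), (8, 3)]

def volume_and_axis_py_alt (shape : List Int) : Int × Int :=
  match pvPad shape with
  | [d0, d1, d2, d3] =>   -- `d0, d1, d2, d3 = dims`
      let mask : Int :=
        (if d0 ≠ 1 then 1 else 0) + (if d1 ≠ 1 then 2 else 0) +
        (if d2 ≠ 1 then 4 else 0) + (if d3 ≠ 1 then 8 else 0)
      (d0 * d1 * d2 * d3, PySem.Dict.getD pvAxisTable mask (-1))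
  | _ => (0, 0)   -- unreachable under Pre_ (Python raises RuntimeError when len ≠ 4)

-- ===== PRECONDITION & SPEC =====
-- Pre_ excludes shapes with more than 4 dims, on which both Pythons raise RuntimeError.
def Pre_volume_and_axis_py (shape : List Int) : Prop := shape.length ≤ 4
instance (shape : List Int) : Decidable (Pre_volume_and_axis_py shape) := by unfold Pre_volume_and_axis_py; infer_instance
def pvWitness_volume_and_axis_py : List Int := [2, 1, 3]
def Spec_volume_and_axis_py (shape : List Int) (out : Int × Int) : Prop := out = volume_and_axis_py_alt shape
instance (shape : List Int) (out : Int × Int) : Decidable (Spec_volume_and_axis_py shape out) := by unfold Spec_volume_and_axis_py; infer_instance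

-- ===== CLAIM (what is proved, stated in full; the proofs are below) =====
def Claim_equal_volume_and_axis_py : Prop := ∀ (shape : List Int), Dom_volume_and_axis_py shape → Pre_volume_and_axis_py shape → Spec_volume_and_axis_py shape (volume_and_axis_py shape)

-- ===== LEMMAS AND PROOFS =====
lemma pad_len4 (shape : List Int) (h : shape.length ≤ 4) :
    ∃ a b c d : Int, pvPad shape = [a, b, c, d] := by
  rcases shape with _ | ⟨a, _ | ⟨b, _ | ⟨c, _ | ⟨d, rest⟩⟩⟩⟩
  · exact ⟨1, 1, 1, 1, rfl⟩
  · exact ⟨1, 1, 1, a, rfl⟩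
  · exact ⟨1, 1, a, b, rfl⟩
  · exact ⟨1, a, b, c, rfl⟩
  · have : rest = [] := by
      simp only [List.length_cons] at h
      exact List.eq_nil_of_length_eq_zero (by omega)
    subst this
    exact ⟨a, b, c, d, by simp [pvPad]⟩

lemma core (a b c d : Int) :
    (let r := pvLoopA [a, b, c, d] 0 1 none; ((r.1, r.2.getD 2) : Int × Int)) =
    (let mask : Int :=
        (if a ≠ 1 then 1 else 0) + (if b ≠ 1 then 2 else 0) +
        (if c ≠ 1 then 4 else 0) + (if d ≠ 1 then 8 else 0)
     (a * b * c * d, PySem.Dict.getD pvAxisTable mask (-1))) := by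
  by_cases ha : a = 1 <;> by_cases hb : b = 1 <;> by_cases hc : c = 1 <;> by_cases hd : d = 1 <;>
    simp [pvLoopA, ha, hb, hc, hd] <;> decide

-- ===== VERDICT (by name: the statement is the Claim_ definition above) =====
theorem volume_and_axis_py_spec : Claim_equal_volume_and_axis_py := by
  intro shape _ hpre
  obtain ⟨a, b, c, d, hp⟩ := pad_len4 shape hpre
  unfold Spec_volume_and_axis_py volume_and_axis_py volume_and_axis_py_alt
  rw [hp]
  exact core a b c d
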